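-- pv_equiv track=rewrite | github.com/rstms/rstms-vimfix | rstms_vimfix/vimfix.py | forge_errors
-- ===== SOURCE A (Python) =====
-- def eformat(error, detail):
--     _, _, detail = detail.partition("--> ")
--     return f"{detail}{error}"
--
-- def forge_errors(lines):
--     """return quickfix error list"""
--     errors = None
--     for i, line in enumerate(lines):
--         if errors is not None and (line.startswith("Error") or line.startswith("Warning")):
--             errors.append(eformat(line, lines[i + 1]))
--         if "Compiler run failed" in line:
--             errors = []
--     if errors is None:
--         errors = []
--     return [line for line in errors if line]
-- ===== SOURCE B (Python) =====
-- def eformat(error, detail):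
--     _, _, detail = detail.partition("--> ")
--     return f"{detail}{error}"
--
-- def forge_errors(lines):
--     """return quickfix error list"""
--     last = None
--     for i, line in enumerate(lines):
--         if "Compiler run failed" in line:
--             last = i
--     if last is None:
--         return []
--     errors = []
--     for i in range(last + 1, len(lines)):
--         line = lines[i]
--         if line.startswith("Error") or line.startswith("Warning"):
--             errors.append(eformat(line, lines[i + 1]))
--     return [e for e in errors if e]
-- ===== Notes on version B (the rewrite author's own statement) =====
-- stated objective: alternative
-- what changed: Instead of a single stateful pass that repeatedly resets an Optional accumulator at every 'Compiler run failed' line, B first locates the index of the LAST 'Compiler run failed' line and then collects Error/Warning entries only from the lines after it, so nothing is ever built and discarded.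
-- crash fix: When the last line both starts with Error/Warning and contains 'Compiler run failed' while an earlier line also contains it, A raises IndexError (it appends before resetting); B returns []. — e.g. on forge_errors(["x Compiler run failed", "Error Compiler run failed"]): A raises IndexError, B returns []
import Mathlib
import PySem

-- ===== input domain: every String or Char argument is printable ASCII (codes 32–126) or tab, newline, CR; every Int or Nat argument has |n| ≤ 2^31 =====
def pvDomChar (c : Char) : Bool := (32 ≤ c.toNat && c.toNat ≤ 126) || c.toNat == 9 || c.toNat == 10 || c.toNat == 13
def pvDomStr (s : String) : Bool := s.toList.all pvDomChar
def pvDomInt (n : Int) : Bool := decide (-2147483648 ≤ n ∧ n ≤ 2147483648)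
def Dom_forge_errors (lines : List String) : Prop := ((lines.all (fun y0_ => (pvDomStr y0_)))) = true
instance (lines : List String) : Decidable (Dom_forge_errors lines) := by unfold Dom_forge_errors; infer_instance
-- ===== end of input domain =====

-- B replaces A's single stateful pass (Optional accumulator reset at every 'Compiler run failed'
-- line) by a two-phase scan: find the last such line, then collect entries only after it (alternative).


-- ===== PORT A =====
-- shared helpers, exact ports of the Python module's predicates/helper
-- eformat: detail.partition("--> ") then f"{after}{error}"; 'partition' is ported by hand on
-- List Char via PySem.Chars.find (first occurrence; after = "" when the separator is absent — exact)
def eformat (error : String) (detail : String) : String :=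
  let d := detail.toList
  let f := PySem.Chars.find d ("--> ".toList)
  let after := if f = -1 then ([] : List Char) else d.drop (f.toNat + 4)
  String.ofList (after ++ error.toList)

def ewLine (l : String) : Bool := PySem.Str.startswith l "Error" || PySem.Str.startswith l "Warning"

def failLine (l : String) : Bool := PySem.Str.isIn "Compiler run failed" l

def forge_errors (lines : List String) : List String :=
  let errors : Option (List String) :=
    (PySem.List.enumerate lines 0).foldl
      (fun (errors : Option (List String)) (p : Int × String) =>
        let errors :=
          if errors.isSome && ewLine p.2 then
            some (errors.getD [] ++ [eformat p.2 (PySem.List.pyGetD lines (p.1 + 1) "")])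
          else errors
        if failLine p.2 then some [] else errors)
      none
  (errors.getD []).filter (fun line => line ≠ "")

-- ===== PORT B =====
-- phase 1: index of the LAST 'Compiler run failed' line
def lastFail (lines : List String) : Option Int :=
  (PySem.List.enumerate lines 0).foldl
    (fun (last : Option Int) (p : Int × String) => if failLine p.2 then some p.1 else last)
    none

def forge_errors_alt (lines : List String) : List String :=
  match lastFail lines with
  | none => []
  | some last =>
    let errors :=
      (PySem.List.pyRange (last + 1) (lines.length : Int) 1).foldl
        (fun (acc : List String) (i : Int) =>
          let line := PySem.List.pyGetD lines i ""
          if ewLine line then acc ++ [eformat line (PySem.List.pyGetD lines (i + 1) "")]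
          else acc)
        []
    errors.filter (fun e => e ≠ "")

-- ===== PRECONDITION & SPEC =====
-- Pre_ excludes exactly the inputs where Python A raises IndexError: the last line starts with
-- Error/Warning while some earlier line contains 'Compiler run failed' (A then reads lines[i+1]
-- past the end). A raises there and returns nowhere in the excluded set.
def Pre_forge_errors (lines : List String) : Prop :=
  ¬ (lines.dropLast.any failLine = true ∧ lines.getLast?.any ewLine = true)
instance (lines : List String) : Decidable (Pre_forge_errors lines) := by
  unfold Pre_forge_errors; infer_instance

def pvWitness_forge_errors : List String :=
  ["a Compiler run failed b", "Error: boom", "  --> file.sol:3:7 z"]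

-- When the last line both starts with Error/Warning and contains 'Compiler run failed' while an
-- earlier line also contains it, A raises IndexError (it appends before resetting); B returns [].
def Raises_forge_errors (lines : List String) : Prop :=
  lines.dropLast.any failLine = true ∧
    lines.getLast?.any (fun l => ewLine l && failLine l) = true
instance (lines : List String) : Decidable (Raises_forge_errors lines) := by
  unfold Raises_forge_errors; infer_instance

def pvRaiseWitness_forge_errors : List String :=
  ["x Compiler run failed", "Error Compiler run failed"]

def pvRaiseWitnessOut_forge_errors : List String := []

def Spec_forge_errors (lines : List String) (out : List String) : Prop := out = forge_errors_alt lines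
instance (lines : List String) (out : List String) : Decidable (Spec_forge_errors lines out) := by unfold Spec_forge_errors; infer_instance

-- ===== CLAIM (what is proved, stated in full; the proofs are below) =====
def Claim_equal_forge_errors : Prop := ∀ (lines : List String), Dom_forge_errors lines → Pre_forge_errors lines → Spec_forge_errors lines (forge_errors lines)

def Claim_raises_forge_errors : Prop :=
  (∀ (lines : List String), Dom_forge_errors lines → Raises_forge_errors lines → ¬ Pre_forge_errors lines) ∧
  (Dom_forge_errors pvRaiseWitness_forge_errors ∧ Raises_forge_errors pvRaiseWitness_forge_errors ∧
    forge_errors_alt pvRaiseWitness_forge_errors = pvRaiseWitnessOut_forge_errors)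

-- ===== LEMMAS AND PROOFS =====

-- entry built from an enumerate pair (detail looked up in the full list by index)
def pentry (lines : List String) (p : Int × String) : String :=
  eformat p.2 (PySem.List.pyGetD lines (p.1 + 1) "")

-- the Error/Warning entries contributed by a run of enumerate pairs
def mf (lines : List String) (ps : List (Int × String)) : List String :=
  (ps.filter (fun p => ewLine p.2)).map (pentry lines)

-- the suffix of pairs strictly after the LAST 'Compiler run failed' pair (none if no such pair)
def tAF : List (Int × String) → Option (List (Int × String))
  | [] => none
  | p :: rest =>
    match tAF rest with
    | some s => some s
    | none => if failLine p.2 then some rest else none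

lemma mf_cons (lines : List String) (p : Int × String) (ps : List (Int × String)) :
    mf lines (p :: ps) =
      if ewLine p.2 then pentry lines p :: mf lines ps else mf lines ps := by
  simp [mf, List.filter_cons]
  by_cases h : ewLine p.2 <;> simp [h]

-- A's loop characterised: the state after folding ps
lemma aloop_eq (lines : List String) :
    ∀ (ps : List (Int × String)) (e : Option (List String)),
      ps.foldl
        (fun (errors : Option (List String)) (p : Int × String) =>
          let errors :=
            if errors.isSome && ewLine p.2 then
              some (errors.getD [] ++ [eformat p.2 (PySem.List.pyGetD lines (p.1 + 1) "")])
            else errors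
          if failLine p.2 then some [] else errors)
        e
      = match tAF ps with
        | some s => some (mf lines s)
        | none => e.map (fun acc => acc ++ mf lines ps) := by
  intro ps
  induction ps with
  | nil => intro e; cases e <;> simp [tAF, mf]
  | cons p rest ih =>
    intro e
    rw [List.foldl_cons, ih]
    cases hrest : tAF rest with
    | some s => simp [tAF, hrest]
    | none =>
      by_cases hf : failLine p.2
      · simp [tAF, hrest, hf, mf]
      · cases e with
        | none => simp [tAF, hrest, hf]
        | some acc =>
          by_cases he : ewLine p.2 <;>
            simp [tAF, hrest, hf, he, mf_cons, pentry, List.append_assoc]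

-- B's phase-2 loop equals the entries of the enumerated suffix
lemma bloop_eq (lines : List String) :
    ∀ (n : Nat) (a : Int) (acc : List String), 0 ≤ a → n = ((lines.length : Int) - a).toNat →
      (PySem.List.pyRange a (lines.length : Int) 1).foldl
        (fun (acc : List String) (i : Int) =>
          let line := PySem.List.pyGetD lines i ""
          if ewLine line then acc ++ [eformat line (PySem.List.pyGetD lines (i + 1) "")]
          else acc)
        acc
      = acc ++ mf lines (PySem.List.enumerate (lines.drop a.toNat) a) := by
  intro n
  induction n with
  | zero =>
    intro a acc ha hn
    have hge : (lines.length : Int) ≤ a := by omega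
    have hd : lines.length ≤ a.toNat := by omega
    rw [PySem.List.pyRange_one_eq_nil hge, List.drop_eq_nil_of_le hd]
    simp [PySem.List.enumerate, mf]
  | succ m ih =>
    intro a acc ha hn
    have hlt : a < (lines.length : Int) := by omega
    have hlt' : a.toNat < lines.length := by omega
    rw [PySem.List.pyRange_one_cons hlt, List.foldl_cons,
        List.drop_eq_getElem_cons hlt']
    have hget : PySem.List.pyGetD lines a "" = lines[a.toNat] :=
      PySem.List.pyGetD_eq_getElem lines "" ha (by exact_mod_cast hlt)
    have htn : (a + 1).toNat = a.toNat + 1 := by omega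
    rw [PySem.List.enumerate_cons, mf_cons]
    by_cases he : ewLine lines[a.toNat]
    · simp only [hget, he, if_pos]
      rw [ih (a + 1) _ (by omega) (by omega), htn]
      simp [pentry, List.append_assoc]
    · simp only [hget, he, if_neg, Bool.false_eq_true, not_false_iff]
      rw [ih (a + 1) _ (by omega) (by omega), htn]

-- a last-index fold from an arbitrary init equals the fold from none, falling back to init
lemma foldl_last_init :
    ∀ (ps : List (Int × String)) (init : Option Int),
      ps.foldl (fun (last : Option Int) (p : Int × String) => if failLine p.2 then some p.1 else last) init
      = match ps.foldl (fun (last : Option Int) (p : Int × String) => if failLine p.2 then some p.1 else last) none with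
        | some j => some j
        | none => init := by
  intro ps
  induction ps with
  | nil => intro init; simp
  | cons q qs ih =>
    intro init
    rw [List.foldl_cons, List.foldl_cons, ih, ih (if failLine q.2 then some q.1 else none)]
    cases hqs : qs.foldl (fun (last : Option Int) (p : Int × String) => if failLine p.2 then some p.1 else last) none with
    | some j => simp
    | none => by_cases hq : failLine q.2 <;> simp [hq]

-- link between B's phase-1 fold and tAF on the enumerated list
lemma link (xs : List String) : ∀ (s : Int),
    match (PySem.List.enumerate xs s).foldl
        (fun (last : Option Int) (p : Int × String) => if failLine p.2 then some p.1 else last)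
        none with
    | none => tAF (PySem.List.enumerate xs s) = none
    | some j => s ≤ j ∧ j < s + xs.length ∧
        tAF (PySem.List.enumerate xs s) =
          some (PySem.List.enumerate (xs.drop (j + 1 - s).toNat) (j + 1)) := by
  induction xs with
  | nil => intro s; simp [PySem.List.enumerate, tAF]
  | cons x rest ih =>
    intro s
    rw [PySem.List.enumerate_cons, List.foldl_cons]
    have ih' := ih (s + 1)
    by_cases hf : failLine x
    · rw [if_pos hf, foldl_last_init]
      cases hin : (PySem.List.enumerate rest (s+1)).foldl
          (fun (last : Option Int) (p : Int × String) => if failLine p.2 then some p.1 else last) none with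
      | some j =>
        rw [hin] at ih'
        obtain ⟨h1, h2, h3⟩ := ih'
        refine ⟨by omega, by simp only [List.length_cons]; push_cast; omega, ?_⟩
        have hdrop : (x :: rest).drop (j + 1 - s).toNat = rest.drop (j + 1 - (s + 1)).toNat := by
          have : (j + 1 - s).toNat = (j + 1 - (s + 1)).toNat + 1 := by omega
          rw [this, List.drop_succ_cons]
        simp only [tAF, h3, hdrop]
      | none =>
        rw [hin] at ih'
        refine ⟨le_refl s, by simp only [List.length_cons]; push_cast; omega, ?_⟩
        have hdrop : (x :: rest).drop (s + 1 - s).toNat = rest := by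
          have : (s + 1 - s).toNat = 1 := by omega
          rw [this, List.drop_succ_cons, List.drop_zero]
        rw [hdrop] at *
        simp [tAF, ih', hf]
    · rw [if_neg (by simp [hf])]
      cases hin : (PySem.List.enumerate rest (s+1)).foldl
          (fun (last : Option Int) (p : Int × String) => if failLine p.2 then some p.1 else last) none with
      | some j =>
        rw [hin] at ih'
        obtain ⟨h1, h2, h3⟩ := ih'
        refine ⟨by omega, by simp only [List.length_cons]; push_cast; omega, ?_⟩
        have hdrop : (x :: rest).drop (j + 1 - s).toNat = rest.drop (j + 1 - (s + 1)).toNat := by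
          have : (j + 1 - s).toNat = (j + 1 - (s + 1)).toNat + 1 := by omega
          rw [this, List.drop_succ_cons]
        simp only [tAF, h3, hdrop]
      | none =>
        rw [hin] at ih'
        simp [tAF, ih', hf]

-- ===== VERDICT (by name: the statement is the Claim_ definition above) =====
theorem forge_errors_spec : Claim_equal_forge_errors := by
  intro lines _ _
  unfold Spec_forge_errors forge_errors forge_errors_alt lastFail
  rw [aloop_eq]
  have hlink := link lines 0
  cases hlf : (PySem.List.enumerate lines 0).foldl
      (fun (last : Option Int) (p : Int × String) => if failLine p.2 then some p.1 else last) none with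
  | none =>
    rw [hlf] at hlink
    simp [hlink]
  | some j =>
    rw [hlf] at hlink
    obtain ⟨h1, h2, h3⟩ := hlink
    rw [h3]
    have hb := bloop_eq lines ((lines.length : Int) - (j + 1)).toNat (j + 1) [] (by omega) rfl
    have h4 : (j + 1 - 0).toNat = (j + 1).toNat := by omega
    rw [h4] at *
    simp [hb]

@[simp] theorem forge_errors_raises : Claim_raises_forge_errors := by
  unfold Claim_raises_forge_errors
  constructor
  · intro lines _ hr
    unfold Pre_forge_errors
    obtain ⟨h1, h2⟩ := hr
    intro hc
    apply hc
    refine ⟨h1, ?_⟩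
    cases hgl : lines.getLast? with
    | none => rw [hgl] at h2; simp at h2
    | some l => rw [hgl] at h2; simp at h2 ⊢; exact h2.1
  · exact ⟨by decide, by decide, by decide⟩
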